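-- pv_equiv track=rewrite | github.com/Jannchie/pymahjong | core/generator.py | div_generator
-- ===== SOURCE A (Python) =====
-- def div_generator(n=13, amount=0, memo=None):
--     if memo is None:
--         memo = {}
--     if n < 1:
--         return [[]]
--     if (n, amount) in memo:
--         return memo[(n, amount)]
--     ans = []
--     for i in [0, 1, 2]:
--         if i == 0:
--             for x in div_generator(n - 1, 0, memo):
--                 ans.append([0] + x)
--         elif amount + i <= 8:
--             for x in div_generator(n - 1, amount + i, memo):
--                 ans.append([i] + x)
--     memo[(n, amount)] = ans
--     return ans
-- ===== SOURCE B (Python) =====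
-- def div_generator(n=13, amount=0, memo=None):
--     # Brute-force enumeration: walk all base-3 codes of length n in
--     # lexicographic order and keep the sequences whose running sum
--     # (reset on 0) never exceeds 8.  The memo parameter is unused.
--     if n < 1:
--         return [[]]
--     res = []
--     for code in range(3 ** n):
--         seq = []
--         c = code
--         for _ in range(n):
--             c, d = divmod(c, 3)
--             seq.append(d)
--         seq.reverse()
--         a = amount
--         ok = True
--         for d in seq:
--             a = 0 if d == 0 else a + d
--             if a > 8:
--                 ok = False
--                 break
--         if ok:
--             res.append(seq)
--     return res
-- ===== Notes on version B (the rewrite author's own statement) =====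
-- stated objective: alternative
-- what changed: A's memoized DFS over (n, amount) states is replaced by direct generate-and-test: enumerate all 3^n base-3 codes in lexicographic order, decode each into its digit sequence and keep it iff the running sum (reset on 0) never exceeds 8; Pre_ excludes n beyond CPython's recursion limit (where A raises RecursionError) and memos pre-seeded with an entry for a reachable state (k, a) with 1 <= k <= n, where A returns whatever arbitrary cached lists the caller injected while B ignores the cache.
import Mathlib
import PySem

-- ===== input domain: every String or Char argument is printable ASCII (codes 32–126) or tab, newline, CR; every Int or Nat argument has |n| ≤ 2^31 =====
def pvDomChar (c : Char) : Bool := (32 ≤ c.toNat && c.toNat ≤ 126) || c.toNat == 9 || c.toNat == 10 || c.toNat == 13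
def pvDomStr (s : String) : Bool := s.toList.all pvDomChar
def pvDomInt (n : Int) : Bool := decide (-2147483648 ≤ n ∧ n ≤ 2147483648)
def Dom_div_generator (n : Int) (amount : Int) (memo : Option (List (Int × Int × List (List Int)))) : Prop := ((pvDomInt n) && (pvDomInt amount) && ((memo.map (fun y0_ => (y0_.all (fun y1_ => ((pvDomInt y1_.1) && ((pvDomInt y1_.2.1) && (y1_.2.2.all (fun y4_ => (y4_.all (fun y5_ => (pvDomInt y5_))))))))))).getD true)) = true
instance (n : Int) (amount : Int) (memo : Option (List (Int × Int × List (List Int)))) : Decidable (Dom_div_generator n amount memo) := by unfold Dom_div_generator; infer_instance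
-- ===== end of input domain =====

-- B replaces A's memoized recursion by direct generate-and-filter over all base-3 codes
-- (same values in the same order), ignoring the memo cache; equality is about the RETURN
-- value only: A mutates the caller's memo dict in place, B does not.

-- ===== PORT A =====
-- first-match lookup of key (n, amount) in the association-list memo
def memoLookup (m : List (Int × Int × List (List Int))) (n amount : Int) : Option (List (List Int)) :=
  match m with
  | [] => none
  | (k, a, v) :: rest => if k = n ∧ a = amount then some v else memoLookup rest n amount

-- A's recursion with the mutated memo threaded through as explicit state; the Nat
-- fuel (always n.toNat at the call) only makes the same recursion structural: at
-- fuel 0 we have n < 1, where A returns [[]] and leaves the memo untouched.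
def divGenCore : Nat → Int → Int → List (Int × Int × List (List Int)) →
    List (List Int) × List (Int × Int × List (List Int))
  | 0, _, _, m => ([[]], m)
  | fuel + 1, n, amount, m =>
    if n < 1 then ([[]], m)
    else
      match memoLookup m n amount with
      | some v => (v, m)
      | none =>
        let p0 := divGenCore fuel (n - 1) 0 m
        let a0 := p0.1.map (fun x => 0 :: x)
        let p1 := if amount + 1 ≤ 8 then
            let q := divGenCore fuel (n - 1) (amount + 1) p0.2
            (a0 ++ q.1.map (fun x => 1 :: x), q.2)
          else (a0, p0.2)
        let p2 := if amount + 2 ≤ 8 then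
            let q := divGenCore fuel (n - 1) (amount + 2) p1.2
            (p1.1 ++ q.1.map (fun x => 2 :: x), q.2)
          else p1
        (p2.1, p2.2 ++ [(n, amount, p2.1)])

def div_generator (n : Int) (amount : Int) (memo : Option (List (Int × Int × List (List Int)))) : List (List Int) :=
  (divGenCore n.toNat n amount (memo.getD [])).1

-- ===== PORT B =====
-- the inner divmod loop: `for _ in range(n): c, d = divmod(c, 3); seq.append(d)`
def decodeLoop : Nat → Int → List Int → Int × List Int
  | 0, c, seq => (c, seq)
  | k + 1, c, seq => decodeLoop k (PySem.Int.floordiv c 3) (seq ++ [PySem.Int.mod c 3])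

-- digits of `code`, most significant first (the loop above, then `seq.reverse()`)
def decodeSeq (k : Nat) (code : Int) : List Int := ((decodeLoop k code []).2).reverse

-- the running-sum check with early break
def okLoop : Int → List Int → Bool
  | _, [] => true
  | amount, d :: rest =>
      let a := if d = 0 then 0 else amount + d
      if a > 8 then false else okLoop a rest

def div_generator_alt (n : Int) (amount : Int) (memo : Option (List (Int × Int × List (List Int)))) : List (List Int) :=
  if n < 1 then [[]]
  else
    (PySem.List.pyRange 0 ((3 : Int) ^ n.toNat) 1).foldl
      (fun res code =>
        if okLoop amount (decodeSeq n.toNat code) then res ++ [decodeSeq n.toNat code] else res) []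

-- ===== PRECONDITION & SPEC =====
-- Pre_ excludes (i) n beyond CPython's default recursion limit, where A's depth-n recursion
-- raises RecursionError, and (ii) memo dicts pre-seeded with an entry whose key is a state
-- (k, a) with 1 ≤ k ≤ n reachable by the call (k < n, or k = n with a = amount): B ignores
-- the memo cache, while A returns whatever arbitrary cached lists the caller injected there.
def Pre_div_generator (n : Int) (amount : Int) (memo : Option (List (Int × Int × List (List Int)))) : Prop :=
  n ≤ 900 ∧ ∀ e ∈ memo.getD [], e.1 < 1 ∨ n < e.1 ∨ (e.1 = n ∧ e.2.1 ≠ amount)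
instance (n : Int) (amount : Int) (memo : Option (List (Int × Int × List (List Int)))) : Decidable (Pre_div_generator n amount memo) := by unfold Pre_div_generator; infer_instance

def pvWitness_div_generator : Int × Int × (Option (List (Int × Int × List (List Int)))) :=
  (3, 0, some [(3, 1, [[7]]), (0, 5, [[1]])])

def Spec_div_generator (n : Int) (amount : Int) (memo : Option (List (Int × Int × List (List Int)))) (out : List (List Int)) : Prop := out = div_generator_alt n amount memo
instance (n : Int) (amount : Int) (memo : Option (List (Int × Int × List (List Int)))) (out : List (List Int)) : Decidable (Spec_div_generator n amount memo out) := by unfold Spec_div_generator; infer_instance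

-- ===== CLAIM (what is proved, stated in full; the proofs are below) =====
def Claim_equal_div_generator : Prop := ∀ (n : Int) (amount : Int) (memo : Option (List (Int × Int × List (List Int)))), Dom_div_generator n amount memo → Pre_div_generator n amount memo → Spec_div_generator n amount memo (div_generator n amount memo)

-- ===== LEMMAS AND PROOFS =====

-- the pure (memo-free) value of A's recursion
def pureGen : Nat → Int → List (List Int)
  | 0, _ => [[]]
  | k + 1, amount =>
      (pureGen k 0).map (fun x => 0 :: x)
      ++ (if amount + 1 ≤ 8 then (pureGen k (amount + 1)).map (fun x => 1 :: x) else [])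
      ++ (if amount + 2 ≤ 8 then (pureGen k (amount + 2)).map (fun x => 2 :: x) else [])

lemma memoLookup_mem {m : List (Int × Int × List (List Int))} {n amount : Int} {v : List (List Int)}
    (h : memoLookup m n amount = some v) : (n, amount, v) ∈ m := by
  induction m with
  | nil => simp [memoLookup] at h
  | cons e rest ih =>
    obtain ⟨k, a, w⟩ := e
    rw [memoLookup] at h
    split at h
    · rename_i hc
      obtain ⟨rfl, rfl⟩ := hc
      obtain rfl : w = v := by injection h
      exact List.mem_cons_self
    · exact List.mem_cons_of_mem _ (ih h)

lemma memoLookup_none {m : List (Int × Int × List (List Int))} {n amount : Int}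
    (h : ∀ e ∈ m, ¬ (e.1 = n ∧ e.2.1 = amount)) : memoLookup m n amount = none := by
  induction m with
  | nil => rfl
  | cons e rest ih =>
    obtain ⟨k, a, w⟩ := e
    rw [memoLookup, if_neg (h _ List.mem_cons_self), ih]
    intro e he
    exact h e (List.mem_cons_of_mem _ he)

-- invariant: a memo whose entries for levels 1..n-1 are correct yields the pure value,
-- and all entries of the output memo are old entries or correct ones
lemma core_spec : ∀ (N : Nat) (n amount : Int) (m : List (Int × Int × List (List Int))),
    n.toNat ≤ N →
    (∀ e ∈ m, 1 ≤ e.1 → e.1 ≤ n - 1 → e.2.2 = pureGen e.1.toNat e.2.1) →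
    ((divGenCore N n amount m).1 = if n < 1 then [[]] else
        match memoLookup m n amount with
        | some v => v
        | none => pureGen n.toNat amount)
    ∧ (∀ e ∈ (divGenCore N n amount m).2, e ∈ m ∨ (1 ≤ e.1 ∧ e.2.2 = pureGen e.1.toNat e.2.1)) := by
  intro N
  induction N with
  | zero =>
    intro n amount m hN hm
    have hn : n < 1 := by omega
    rw [divGenCore]
    exact ⟨by rw [if_pos hn], fun e he => Or.inl he⟩
  | succ N ih =>
    intro n amount m hN hm
    by_cases hn : n < 1
    · rw [divGenCore, if_pos hn]
      exact ⟨by rw [if_pos hn], fun e he => Or.inl he⟩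
    · rw [divGenCore, if_neg hn]
      cases hml : memoLookup m n amount with
      | some v =>
        exact ⟨by rw [if_neg hn], fun e he => Or.inl he⟩
      | none =>
        have step : ∀ (x : Int) (m' : List (Int × Int × List (List Int))),
            (∀ e ∈ m', e ∈ m ∨ (1 ≤ e.1 ∧ e.2.2 = pureGen e.1.toNat e.2.1)) →
            (divGenCore N (n - 1) x m').1 = pureGen (n - 1).toNat x
            ∧ (∀ e ∈ (divGenCore N (n - 1) x m').2,
                e ∈ m ∨ (1 ≤ e.1 ∧ e.2.2 = pureGen e.1.toNat e.2.1)) := by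
          intro x m' hP
          have hm' : ∀ e ∈ m', 1 ≤ e.1 → e.1 ≤ (n - 1) - 1 → e.2.2 = pureGen e.1.toNat e.2.1 := by
            intro e he h1 h2
            rcases hP e he with hmem | ⟨_, hv⟩
            · exact hm e hmem h1 (by omega)
            · exact hv
          have hsub := ih (n - 1) x m' (by omega) hm'
          refine ⟨?_, ?_⟩
          · rw [hsub.1]
            by_cases hlt : n - 1 < 1
            · have h0 : (n - 1).toNat = 0 := by omega
              rw [if_pos hlt, h0, pureGen]
            · rw [if_neg hlt]
              cases hml' : memoLookup m' (n - 1) x with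
              | none => rfl
              | some v =>
                rcases hP _ (memoLookup_mem hml') with hin | ⟨_, hv⟩
                · exact hm _ hin (by omega) (by omega)
                · exact hv
          · intro e he
            rcases hsub.2 e he with hin | hc
            · exact hP e hin
            · exact Or.inr hc
        have h0 := step 0 m (fun e he => Or.inl he)
        have hnn : n.toNat = (n - 1).toNat + 1 := by omega
        by_cases hc1 : amount + 1 ≤ 8 <;> by_cases hc2 : amount + 2 ≤ 8
        · simp only [if_pos hc1, if_pos hc2, if_neg hn]
          have h1 := step (amount + 1) (divGenCore N (n - 1) 0 m).2 h0.2
          have h2 := step (amount + 2)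
            (divGenCore N (n - 1) (amount + 1) (divGenCore N (n - 1) 0 m).2).2 h1.2
          have hval : ((divGenCore N (n - 1) 0 m).1.map (fun x => 0 :: x)
              ++ (divGenCore N (n - 1) (amount + 1) (divGenCore N (n - 1) 0 m).2).1.map (fun x => 1 :: x)
              ++ (divGenCore N (n - 1) (amount + 2)
                    (divGenCore N (n - 1) (amount + 1) (divGenCore N (n - 1) 0 m).2).2).1.map
                  (fun x => 2 :: x)) = pureGen n.toNat amount := by
            rw [hnn, pureGen, if_pos hc1, if_pos hc2, h0.1, h1.1, h2.1]
          refine ⟨hval, ?_⟩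
          intro e he
          rcases List.mem_append.1 he with he' | he'
          · exact h2.2 e he'
          · rcases List.mem_singleton.1 he' with rfl
            exact Or.inr ⟨by omega, hval⟩
        · simp only [if_pos hc1, if_neg hc2, if_neg hn]
          have h1 := step (amount + 1) (divGenCore N (n - 1) 0 m).2 h0.2
          have hval : ((divGenCore N (n - 1) 0 m).1.map (fun x => 0 :: x)
              ++ (divGenCore N (n - 1) (amount + 1) (divGenCore N (n - 1) 0 m).2).1.map (fun x => 1 :: x))
              = pureGen n.toNat amount := by
            rw [hnn, pureGen, if_pos hc1, if_neg hc2, h0.1, h1.1, List.append_nil]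
          refine ⟨hval, ?_⟩
          intro e he
          rcases List.mem_append.1 he with he' | he'
          · exact h1.2 e he'
          · rcases List.mem_singleton.1 he' with rfl
            exact Or.inr ⟨by omega, hval⟩
        · exact absurd hc2 (by omega)
        · simp only [if_neg hc1, if_neg hc2, if_neg hn]
          have hval : ((divGenCore N (n - 1) 0 m).1.map (fun x => 0 :: x))
              = pureGen n.toNat amount := by
            rw [hnn, pureGen, if_neg hc1, if_neg hc2, h0.1, List.append_nil, List.append_nil]
          refine ⟨hval, ?_⟩
          intro e he
          rcases List.mem_append.1 he with he' | he'
          · exact h0.2 e he'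
          · rcases List.mem_singleton.1 he' with rfl
            exact Or.inr ⟨by omega, hval⟩

-- ---- B side ----

lemma decodeLoop_acc (k : Nat) : ∀ (c : Int) (s : List Int),
    (decodeLoop k c s).2 = s ++ (decodeLoop k c []).2 := by
  induction k with
  | zero => intro c s; simp [decodeLoop]
  | succ k ih =>
    intro c s
    rw [decodeLoop, decodeLoop, ih, ih (PySem.Int.floordiv c 3) ([] ++ [PySem.Int.mod c 3])]
    simp

lemma decodeLoop_succ (k : Nat) (c : Int) :
    (decodeLoop (k + 1) c []).2 = PySem.Int.mod c 3 :: (decodeLoop k (PySem.Int.floordiv c 3) []).2 := by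
  rw [decodeLoop, decodeLoop_acc]
  simp

-- peeling the most significant digit
lemma decodeSeq_shift : ∀ (k : Nat) (d r : Int), 0 ≤ d → d < 3 → 0 ≤ r → r < 3 ^ k →
    decodeSeq (k + 1) (d * 3 ^ k + r) = d :: decodeSeq k r := by
  intro k
  induction k with
  | zero =>
    intro d r hd0 hd3 hr0 hrk
    have hr : r = 0 := by
      have h1 : (3 : Int) ^ 0 = 1 := pow_zero 3
      omega
    subst hr
    have h3 : (0 : Int) < 3 := by norm_num
    simp only [decodeSeq, decodeLoop, pow_zero, mul_one, add_zero, List.nil_append,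
      List.reverse_cons, List.reverse_nil]
    rw [PySem.Int.mod_eq_emod_of_pos h3, Int.emod_eq_of_lt hd0 hd3]
  | succ k ih =>
    intro d r hd0 hd3 hr0 hrk
    have h3 : (0 : Int) < 3 := by norm_num
    have he : d * 3 ^ (k + 1) + r = r + d * 3 ^ k * 3 := by ring
    have hm : (d * 3 ^ (k + 1) + r) % 3 = r % 3 := by
      rw [he]; omega
    have hdv : (d * 3 ^ (k + 1) + r) / 3 = d * 3 ^ k + r / 3 := by
      rw [he]; omega
    have hrq0 : 0 ≤ r / 3 := Int.ediv_nonneg hr0 (by norm_num)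
    have hrqk : r / 3 < 3 ^ k := by
      apply Int.ediv_lt_of_lt_mul h3
      calc r < 3 ^ (k + 1) := hrk
        _ = 3 ^ k * 3 := by ring
    have ihr := ih d (r / 3) hd0 hd3 hrq0 hrqk
    unfold decodeSeq at ihr ⊢
    conv_lhs => rw [decodeLoop_succ]
    conv_rhs => rw [decodeLoop_succ]
    simp only [PySem.Int.mod_eq_emod_of_pos h3, PySem.Int.floordiv_eq_ediv_of_pos h3, hm, hdv]
    simp only [List.reverse_cons]
    rw [ihr]
    simp

lemma okLoop_zero (amount : Int) (s : List Int) : okLoop amount (0 :: s) = okLoop 0 s := by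
  simp [okLoop]

lemma okLoop_pos (amount d : Int) (s : List Int) (hd : d ≠ 0) :
    okLoop amount (d :: s) = if amount + d > 8 then false else okLoop (amount + d) s := by
  simp [okLoop, hd]

-- a segment of 3^k consecutive codes shares its leading digit d
lemma seg_eq (k : Nat) (d : Int) (hd0 : 0 ≤ d) (hd3 : d < 3) (amount : Int) :
    ((PySem.List.pyRange (d * 3 ^ k) ((d + 1) * 3 ^ k) 1).filter
        (fun c => okLoop amount (decodeSeq (k + 1) c))).map (decodeSeq (k + 1))
    = ((PySem.List.pyRange 0 ((3 : Int) ^ k) 1).filter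
        (fun c => okLoop amount (d :: decodeSeq k c))).map (fun c => d :: decodeSeq k c) := by
  have hpos : (0 : Int) < 3 ^ k := by positivity
  have hcast : ((((3 : Int) ^ k).toNat : Int)) = 3 ^ k := Int.toNat_of_nonneg (le_of_lt hpos)
  have hseg : PySem.List.pyRange (d * 3 ^ k) ((d + 1) * 3 ^ k) 1
      = (List.range ((3 : Int) ^ k).toNat).map (fun (j : Nat) => d * 3 ^ k + (j : Int)) := by
    rw [PySem.List.pyRange_one]
    have h1 : (d + 1) * 3 ^ k - d * 3 ^ k = 3 ^ k := by ring
    rw [h1]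
  have hbase : PySem.List.pyRange 0 ((3 : Int) ^ k) 1
      = (List.range ((3 : Int) ^ k).toNat).map (fun (j : Nat) => (j : Int)) := by
    rw [PySem.List.pyRange_one]
    simp
  have hshift : ∀ j ∈ List.range ((3 : Int) ^ k).toNat,
      decodeSeq (k + 1) (d * 3 ^ k + (j : Int)) = d :: decodeSeq k (j : Int) := by
    intro j hj
    apply decodeSeq_shift k d (j : Int) hd0 hd3 (by positivity)
    have hj' : j < ((3 : Int) ^ k).toNat := List.mem_range.1 hj
    omega
  rw [hseg, hbase, List.filter_map, List.filter_map, List.map_map, List.map_map]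
  rw [List.filter_congr (q := fun (j : Nat) => okLoop amount (d :: decodeSeq k (j : Int)))
      (by intro j hj; simp only [Function.comp_apply, hshift j hj])]
  apply List.map_congr_left
  intro j hj
  have hj' : j ∈ List.range ((3 : Int) ^ k).toNat := List.mem_of_mem_filter hj
  simp only [Function.comp_apply, hshift j hj']

-- B's filtered enumeration equals the pure recursion
lemma filtered_eq : ∀ (k : Nat) (amount : Int),
    ((PySem.List.pyRange 0 ((3 : Int) ^ k) 1).filter
        (fun c => okLoop amount (decodeSeq k c))).map (decodeSeq k) = pureGen k amount := by
  intro k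
  induction k with
  | zero =>
    intro amount
    have h0 : PySem.List.pyRange 0 ((3 : Int) ^ 0) 1 = [0] := by decide
    rw [h0]
    simp [decodeSeq, decodeLoop, okLoop, pureGen]
  | succ k ih =>
    intro amount
    have hpos : (0 : Int) < 3 ^ k := by positivity
    have hsplit : PySem.List.pyRange 0 ((3 : Int) ^ (k + 1)) 1
        = PySem.List.pyRange (0 * 3 ^ k) ((0 + 1) * 3 ^ k) 1
          ++ PySem.List.pyRange (1 * 3 ^ k) ((1 + 1) * 3 ^ k) 1
          ++ PySem.List.pyRange (2 * 3 ^ k) ((2 + 1) * 3 ^ k) 1 := by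
      have e1 : PySem.List.pyRange 0 ((3 : Int) ^ (k + 1)) 1
          = PySem.List.pyRange 0 (3 ^ k) 1 ++ PySem.List.pyRange (3 ^ k) (3 ^ (k + 1)) 1 :=
        PySem.List.pyRange_one_append 0 (3 ^ k) (3 ^ (k + 1)) (le_of_lt hpos)
          (by calc (3:Int) ^ k ≤ 3 ^ k * 3 := by nlinarith
                _ = 3 ^ (k + 1) := by ring)
      have e2 : PySem.List.pyRange ((3 : Int) ^ k) (3 ^ (k + 1)) 1
          = PySem.List.pyRange (3 ^ k) (2 * 3 ^ k) 1
            ++ PySem.List.pyRange (2 * 3 ^ k) (3 ^ (k + 1)) 1 :=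
        PySem.List.pyRange_one_append (3 ^ k) (2 * 3 ^ k) (3 ^ (k + 1)) (by nlinarith)
          (by calc (2:Int) * 3 ^ k ≤ 3 * 3 ^ k := by nlinarith
                _ = 3 ^ (k + 1) := by ring)
      rw [e1, e2, show (0 : Int) * 3 ^ k = 0 from by ring,
          show ((0 : Int) + 1) * 3 ^ k = 3 ^ k from by ring,
          show (1 : Int) * 3 ^ k = 3 ^ k from by ring,
          show ((1 : Int) + 1) * 3 ^ k = 2 * 3 ^ k from by ring,
          show ((2 : Int) + 1) * 3 ^ k = 3 ^ (k + 1) from by ring,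
          List.append_assoc]
    rw [hsplit, List.filter_append, List.filter_append, List.map_append, List.map_append]
    rw [seg_eq k 0 (by norm_num) (by norm_num) amount,
        seg_eq k 1 (by norm_num) (by norm_num) amount,
        seg_eq k 2 (by norm_num) (by norm_num) amount]
    have hpg : pureGen (k + 1) amount =
        (pureGen k 0).map (fun x => 0 :: x)
        ++ (if amount + 1 ≤ 8 then (pureGen k (amount + 1)).map (fun x => 1 :: x) else [])
        ++ (if amount + 2 ≤ 8 then (pureGen k (amount + 2)).map (fun x => 2 :: x) else []) := rfl
    rw [hpg]
    congr 1
    · congr 1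
      · -- d = 0 segment
        simp only [okLoop_zero]
        rw [← ih 0, List.map_map]
        simp [Function.comp_def]
      · -- d = 1 segment
        by_cases h1 : amount + 1 ≤ 8
        · rw [if_pos h1]
          have : ∀ c, okLoop amount (1 :: decodeSeq k c) = okLoop (amount + 1) (decodeSeq k c) := by
            intro c
            rw [okLoop_pos amount 1 _ one_ne_zero, if_neg (by omega)]
          simp only [this]
          rw [← ih (amount + 1), List.map_map]
          simp [Function.comp_def]
        · rw [if_neg h1]
          have : ∀ c ∈ PySem.List.pyRange 0 ((3 : Int) ^ k) 1,
              okLoop amount (1 :: decodeSeq k c) = false := by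
            intro c _
            rw [okLoop_pos amount 1 _ one_ne_zero, if_pos (by omega)]
          rw [List.filter_congr this]
          simp
    · -- d = 2 segment
      by_cases h2 : amount + 2 ≤ 8
      · rw [if_pos h2]
        have : ∀ c, okLoop amount (2 :: decodeSeq k c) = okLoop (amount + 2) (decodeSeq k c) := by
          intro c
          rw [okLoop_pos amount 2 _ two_ne_zero, if_neg (by omega)]
        simp only [this]
        rw [← ih (amount + 2), List.map_map]
        simp [Function.comp_def]
      · rw [if_neg h2]
        have : ∀ c ∈ PySem.List.pyRange 0 ((3 : Int) ^ k) 1,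
            okLoop amount (2 :: decodeSeq k c) = false := by
          intro c _
          rw [okLoop_pos amount 2 _ two_ne_zero, if_pos (by omega)]
        rw [List.filter_congr this]
        simp

lemma alt_body_eq (n : Int) (amount : Int) :
    (PySem.List.pyRange 0 ((3 : Int) ^ n.toNat) 1).foldl
      (fun res code =>
        if okLoop amount (decodeSeq n.toNat code) then res ++ [decodeSeq n.toNat code] else res) []
    = pureGen n.toNat amount := by
  rw [PySem.List.foldl_append_if (fun c => okLoop amount (decodeSeq n.toNat c)) (decodeSeq n.toNat)]
  simpa using filtered_eq n.toNat amount

-- ===== VERDICT (by name: the statement is the Claim_ definition above) =====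
theorem div_generator_spec : Claim_equal_div_generator := by
  intro n amount memo _ hpre
  obtain ⟨-, hpre⟩ := hpre
  unfold Spec_div_generator div_generator div_generator_alt
  have hmemo : ∀ e ∈ memo.getD [], (1 : Int) ≤ e.1 → e.1 ≤ n - 1 → e.2.2 = pureGen e.1.toNat e.2.1 := by
    intro e he h1 h2
    rcases hpre e he with h | h | ⟨h, _⟩ <;> omega
  have hcore := (core_spec n.toNat n amount (memo.getD []) le_rfl hmemo).1
  rw [hcore]
  by_cases hn : n < 1
  · simp [hn]
  · rw [if_neg hn, if_neg hn]
    have hnone : memoLookup (memo.getD []) n amount = none := by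
      apply memoLookup_none
      intro e he ⟨hk, ha⟩
      rcases hpre e he with h | h | ⟨_, h⟩ <;> omega
    rw [hnone, alt_body_eq n amount]
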